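-- pv_equiv track=rewrite | github.com/lingpy/tiers-old | tiers.py | get_numeric_matrix
-- ===== SOURCE A (Python) =====
-- def get_numeric_matrix(matrix):
--     """
--     Convert a value matrix into a numeric matrix.
--     """
--     # get a converter for all columns in the matrix
--     out = [[0 for cell in row] for row in matrix]
--     for i in range(len(matrix[0])):
--         col = [line[i] for line in matrix]
--         idx = 0
--         tmp = {}
--         for j,cell in enumerate(col):
--             if cell in tmp:
--                 out[j][i] = tmp[cell]
--             else:
--                 idx += 1
--                 tmp[cell] = idx
--                 out[j][i] = tmp[cell]
--     return out
-- ===== SOURCE B (Python) =====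
-- def _label(mp, cnt, cell):
--     """Return (mp, cnt, label) after labelling one cell of a column."""
--     lab = mp.get(cell)
--     if lab is None:
--         cnt += 1
--         lab = cnt
--         mp[cell] = lab
--     return mp, cnt, lab
--
--
-- def get_numeric_matrix(matrix):
--     """
--     Convert a value matrix into a numeric matrix.
--     """
--     ncols = len(matrix[0])
--     # one (dict, counter) labelling state per column, threaded through a
--     # single row-major pass instead of rescanning each column
--     states = [({}, 0) for _ in range(ncols)]
--     out = []
--     for row in matrix:
--         orow = [0] * len(row)
--         new_states = []
--         for i, (mp, cnt) in enumerate(states):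
--             mp, cnt, lab = _label(mp, cnt, row[i])
--             new_states.append((mp, cnt))
--             orow[i] = lab
--         states = new_states
--         out.append(orow)
--     return out
-- ===== Notes on version B (the rewrite author's own statement) =====
-- stated objective: alternative
-- what changed: A rescans the matrix column by column, rebuilding each column list and a fresh dict per column; B makes one fused row-major pass that threads a per-column (dict, counter) labelling state across rows, so no column list is ever materialised.
-- outside the precondition, e.g. on get_numeric_matrix([]): A raises IndexError, B raises IndexError; on get_numeric_matrix([['a', 'b'], ['a']]): A raises IndexError, B raises IndexError
import Mathlib
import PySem

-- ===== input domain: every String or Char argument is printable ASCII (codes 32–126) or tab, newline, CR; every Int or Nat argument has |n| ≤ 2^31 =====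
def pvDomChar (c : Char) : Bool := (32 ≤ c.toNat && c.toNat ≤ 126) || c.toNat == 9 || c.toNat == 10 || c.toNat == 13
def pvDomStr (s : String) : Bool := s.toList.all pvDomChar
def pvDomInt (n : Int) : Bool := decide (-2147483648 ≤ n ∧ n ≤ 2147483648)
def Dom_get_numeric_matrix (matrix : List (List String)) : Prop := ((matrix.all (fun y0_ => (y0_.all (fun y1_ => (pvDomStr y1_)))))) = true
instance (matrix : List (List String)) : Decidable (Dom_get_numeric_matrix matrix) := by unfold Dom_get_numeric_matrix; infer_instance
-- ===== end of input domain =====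

-- B replaces A's column-by-column rescan with one fused row-major pass threading a per-column
-- (dict, counter) labelling state; equivalence of the two traversal orders is proved on all
-- inputs where the Python A returns (Pre_ below). Objective: alternative (same cost, different algorithm).

-- ===== PORT A =====
-- loop body of A's inner 'for j, cell in enumerate(col)' (mutation out[j][i] = … ported as List.set)
def stepA (i : Nat) (acc : List (List Int) × PySem.Dict String Int × Int)
    (cj : String × Nat) : List (List Int) × PySem.Dict String Int × Int :=
  match acc.2.1.get? cj.1 with
  | some v => (acc.1.set cj.2 ((acc.1.getD cj.2 []).set i v), acc.2.1, acc.2.2)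
  | none =>
      (acc.1.set cj.2 ((acc.1.getD cj.2 []).set i (acc.2.2 + 1)),
       acc.2.1.insert cj.1 (acc.2.2 + 1), acc.2.2 + 1)

def get_numeric_matrix (matrix : List (List String)) : List (List Int) :=
  let out0 := matrix.map (fun row => row.map (fun _ => (0 : Int)))
  -- 'matrix[0]' raises on [] (excluded by Pre_); ported as headD. 'line[i]' raises on short
  -- rows (excluded by Pre_); ported as getD.
  (List.range (matrix.headD []).length).foldl
    (fun out i =>
      let col := matrix.map (fun line => line.getD i "")
      (col.zipIdx.foldl (stepA i) (out, PySem.Dict.empty, 0)).1)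
    out0

-- ===== PORT B =====
-- port of Source B's _label helper
def pyLabel (mp : PySem.Dict String Int) (cnt : Int) (cell : String) :
    PySem.Dict String Int × Int × Int :=
  match mp.get? cell with
  | some lab => (mp, cnt, lab)
  | none => (mp.insert cell (cnt + 1), cnt + 1, cnt + 1)

-- loop body of B's inner 'for i, (mp, cnt) in enumerate(states)'
def stepB (row : List String) (p : List (PySem.Dict String Int × Int) × List Int)
    (si : (PySem.Dict String Int × Int) × Nat) :
    List (PySem.Dict String Int × Int) × List Int :=
  let r := pyLabel si.1.1 si.1.2 (row.getD si.2 "")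
  (p.1 ++ [(r.1, r.2.1)], p.2.set si.2 r.2.2)

def get_numeric_matrix_alt (matrix : List (List String)) : List (List Int) :=
  let ncols := (matrix.headD []).length
  let states0 : List (PySem.Dict String Int × Int) :=
    (List.range ncols).map (fun _ => ((PySem.Dict.empty : PySem.Dict String Int), (0 : Int)))
  (matrix.foldl
    (fun (acc : List (List Int) × List (PySem.Dict String Int × Int)) row =>
      let zero := row.map (fun _ => (0 : Int))
      let r := acc.2.zipIdx.foldl (stepB row) ([], zero)
      (acc.1 ++ [r.2], r.1))
    (([] : List (List Int)), states0)).1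

-- ===== PRECONDITION & SPEC =====
-- Pre_ excludes exactly the inputs where the Python A raises IndexError: the empty matrix
-- (matrix[0]) and matrices with a row shorter than the first row (line[i]).
def Pre_get_numeric_matrix (matrix : List (List String)) : Prop :=
  matrix ≠ [] ∧ ∀ row ∈ matrix, (matrix.headD []).length ≤ row.length
instance (matrix : List (List String)) : Decidable (Pre_get_numeric_matrix matrix) := by
  unfold Pre_get_numeric_matrix; infer_instance

def pvWitness_get_numeric_matrix : List (List String) := [["a", "b"], ["b", "b"], ["a", "c"]]

def Spec_get_numeric_matrix (matrix : List (List String)) (out : List (List Int)) : Prop :=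
  out = get_numeric_matrix_alt matrix
instance (matrix : List (List String)) (out : List (List Int)) :
    Decidable (Spec_get_numeric_matrix matrix out) := by
  unfold Spec_get_numeric_matrix; infer_instance

-- ===== CLAIM (what is proved, stated in full; the proofs are below) =====
def Claim_equal_get_numeric_matrix : Prop :=
  ∀ (matrix : List (List String)), Dom_get_numeric_matrix matrix →
    Pre_get_numeric_matrix matrix →
    Spec_get_numeric_matrix matrix (get_numeric_matrix matrix)

-- ===== LEMMAS AND PROOFS =====

-- the common mathematical core: one labelling state per column, advanced cell by cell
def lab1 (st : PySem.Dict String Int × Int) (c : String) : Int :=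
  match st.1.get? c with
  | some v => v
  | none => st.2 + 1

def st1 (st : PySem.Dict String Int × Int) (c : String) : PySem.Dict String Int × Int :=
  match st.1.get? c with
  | some _ => st
  | none => (st.1.insert c (st.2 + 1), st.2 + 1)

def runCol (st : PySem.Dict String Int × Int) : List String → List Int
  | [] => []
  | c :: cs => lab1 st c :: runCol (st1 st c) cs

def runSt (st : PySem.Dict String Int × Int) : List String → PySem.Dict String Int × Int
  | [] => st
  | c :: cs => runSt (st1 st c) cs

def colOf (m : List (List String)) (i : Nat) : List String :=
  m.map (fun line => line.getD i "")

-- the common normal form both ports are reduced to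
def bOut (nc : Nat) (p : List (List String)) : List (List Int) :=
  (List.range p.length).map (fun j =>
    (List.range ((p.getD j []).length)).map (fun i =>
      if i < nc then (runCol (PySem.Dict.empty, 0) (colOf p i)).getD j 0 else 0))

def bStates (nc : Nat) (p : List (List String)) : List (PySem.Dict String Int × Int) :=
  (List.range nc).map (fun i => runSt (PySem.Dict.empty, 0) (colOf p i))

-- generic getD facts
lemma getD_set_eq {α : Type} (l : List α) (k j : Nat) (a d : α) :
    (l.set k a).getD j d = if k = j ∧ k < l.length then a else l.getD j d := by
  simp only [List.getD_eq_getElem?_getD, List.getElem?_set]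
  by_cases h1 : k = j
  · subst h1
    by_cases h2 : k < l.length
    · simp [h2]
    · simp [h2, List.getElem?_eq_none (le_of_not_gt h2)]
  · simp [h1]

lemma getD_append_left {α : Type} (xs ys : List α) (j : Nat) (d : α) (h : j < xs.length) :
    (xs ++ ys).getD j d = xs.getD j d := by
  simp [List.getD_eq_getElem?_getD, List.getElem?_append_left h]

lemma getD_append_len {α : Type} (xs ys : List α) (d : α) :
    (xs ++ ys).getD xs.length d = ys.getD 0 d := by
  simp [List.getD_eq_getElem?_getD, List.getElem?_append_right (le_refl xs.length)]

lemma getD_lt {α : Type} (l : List α) (j : Nat) (d : α) (h : j < l.length) :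
    l.getD j d = l[j] := by
  simp [List.getD_eq_getElem?_getD, List.getElem?_eq_getElem h]

-- runCol / runSt structure
lemma length_runCol (st : PySem.Dict String Int × Int) (cs : List String) :
    (runCol st cs).length = cs.length := by
  induction cs generalizing st with
  | nil => rfl
  | cons c cs ih => simp [runCol, ih]

lemma runSt_append (st : PySem.Dict String Int × Int) (xs ys : List String) :
    runSt st (xs ++ ys) = runSt (runSt st xs) ys := by
  induction xs generalizing st with
  | nil => rfl
  | cons c cs ih => simp [runSt, ih]

lemma runCol_append (st : PySem.Dict String Int × Int) (xs ys : List String) :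
    runCol st (xs ++ ys) = runCol st xs ++ runCol (runSt st xs) ys := by
  induction xs generalizing st with
  | nil => rfl
  | cons c cs ih => simp [runCol, runSt, ih]

lemma colOf_append (p q : List (List String)) (i : Nat) :
    colOf (p ++ q) i = colOf p i ++ colOf q i := by
  simp [colOf]

-- ========== A side ==========

def writeCol (i : Nat) : Nat → List Int → List (List Int) → List (List Int)
  | _, [], out => out
  | k, v :: vs, out => writeCol i (k + 1) vs (out.set k ((out.getD k []).set i v))

lemma stepA_eq (i : Nat) (out : List (List Int)) (st : PySem.Dict String Int × Int)
    (c : String) (k : Nat) :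
    stepA i (out, st) (c, k) = (out.set k ((out.getD k []).set i (lab1 st c)), st1 st c) := by
  cases h : st.1.get? c <;> simp [stepA, lab1, st1, h]

lemma A_inner (i : Nat) (cs : List String) : ∀ (k : Nat) st (out : List (List Int)),
    (cs.zipIdx k).foldl (stepA i) (out, st) = (writeCol i k (runCol st cs) out, runSt st cs) := by
  induction cs with
  | nil => intro k st out; simp [runCol, runSt, writeCol]
  | cons c cs ih =>
      intro k st out
      rw [List.zipIdx_cons, List.foldl_cons, stepA_eq, ih]
      simp [runCol, runSt, writeCol]

lemma length_writeCol (i : Nat) (vs : List Int) : ∀ (k : Nat) (out : List (List Int)),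
    (writeCol i k vs out).length = out.length := by
  induction vs with
  | nil => intro k out; rfl
  | cons v vs ih => intro k out; simp [writeCol, ih]

lemma getD_writeCol (i : Nat) (vs : List Int) : ∀ (k : Nat) (out : List (List Int)) (j : Nat),
    k + vs.length ≤ out.length →
    (writeCol i k vs out).getD j [] =
      if k ≤ j ∧ j < k + vs.length then (out.getD j []).set i (vs.getD (j - k) 0)
      else out.getD j [] := by
  induction vs with
  | nil => intro k out j _; simp [writeCol]
  | cons v vs ih =>
      intro k out j h
      have hk : k < out.length := by simp at h; omega
      rw [writeCol, ih (k + 1) _ j (by simp at h ⊢; omega)]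
      by_cases hj : j = k
      · subst hj
        have : ¬ (j + 1 ≤ j ∧ j < j + 1 + vs.length) := by omega
        simp only [this, if_neg]
        rw [getD_set_eq]
        simp [hk]
      · by_cases hr : k + 1 ≤ j ∧ j < k + 1 + vs.length
        · have hr' : k ≤ j ∧ j < k + (vs.length + 1) := by omega
          simp only [hr, if_pos, List.length_cons, hr', and_true]
          rw [getD_set_eq]
          have : ¬ (k = j ∧ k < out.length) := by omega
          simp only [this, if_neg]
          have : j - k = (j - (k + 1)) + 1 := by omega
          simp [this, hr']
        · have hr' : ¬ (k ≤ j ∧ j < k + (vs.length + 1)) := by omega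
          simp only [hr, if_neg, List.length_cons, hr']
          rw [getD_set_eq]
          have : ¬ (k = j ∧ k < out.length) := by simp [hj]; omega
          simp [this]

def applyCols (m : List (List String)) (is : List Nat) (out : List (List Int)) :
    List (List Int) :=
  is.foldl (fun out i => writeCol i 0 (runCol (PySem.Dict.empty, 0) (colOf m i)) out) out

lemma applyCols_length (m : List (List String)) (is : List Nat) :
    ∀ out, (applyCols m is out).length = out.length := by
  induction is with
  | nil => intro out; rfl
  | cons i is ih => intro out; simp [applyCols, List.foldl_cons] at ih ⊢; rw [ih, length_writeCol]

lemma applyCols_rowlen (m : List (List String)) (is : List Nat) :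
    ∀ out j, out.length = m.length →
      ((applyCols m is out).getD j []).length = ((out.getD j []).length) := by
  induction is with
  | nil => intro out j _; rfl
  | cons i is ih =>
      intro out j hlen
      simp only [applyCols, List.foldl_cons] at ih ⊢
      rw [ih _ j (by rw [length_writeCol]; exact hlen)]
      rw [getD_writeCol _ _ _ _ _ (by simp [length_runCol, colOf, hlen])]
      split_ifs <;> simp

lemma getD_map_zero (l : List String) (i : Nat) :
    ((l.map (fun _ => (0 : Int))).getD i 0) = 0 := by
  simp only [List.getD_eq_getElem?_getD, List.getElem?_map]
  cases l[i]? <;> simp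

lemma applyCols_getD (m : List (List String)) (hP : ∀ row ∈ m, (m.headD []).length ≤ row.length)
    (is : List Nat) : ∀ out, out.length = m.length →
    (∀ j', ((out.getD j' []).length) = ((m.getD j' []).length)) →
    (∀ i ∈ is, i < (m.headD []).length) → ∀ j i',
    ((applyCols m is out).getD j []).getD i' 0 =
      if i' ∈ is ∧ j < m.length then (runCol (PySem.Dict.empty, 0) (colOf m i')).getD j 0
      else (out.getD j []).getD i' 0 := by
  induction is with
  | nil => intro out _ _ _ j i'; simp [applyCols]
  | cons i is ih =>
      intro out hlen hrow hlt j i'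
      simp only [applyCols, List.foldl_cons] at ih ⊢
      have hilt : i < (m.headD []).length := hlt i List.mem_cons_self
      have hlenv : (runCol (PySem.Dict.empty, 0) (colOf m i)).length = m.length := by
        rw [length_runCol]; simp [colOf]
      have hwlen : (writeCol i 0 (runCol (PySem.Dict.empty, 0) (colOf m i)) out).length = m.length := by
        rw [length_writeCol]; exact hlen
      have hw := getD_writeCol i (runCol (PySem.Dict.empty, 0) (colOf m i)) 0 out j
        (by rw [Nat.zero_add, hlenv, hlen])
      rw [Nat.zero_add, hlenv, Nat.sub_zero] at hw
      have hwrow : ∀ j', (((writeCol i 0 (runCol (PySem.Dict.empty, 0) (colOf m i)) out).getD j' []).length)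
          = ((m.getD j' []).length) := by
        intro j'
        have hw' := getD_writeCol i (runCol (PySem.Dict.empty, 0) (colOf m i)) 0 out j'
          (by rw [Nat.zero_add, hlenv, hlen])
        rw [hw']
        split_ifs
        · rw [List.length_set]; exact hrow j'
        · exact hrow j'
      rw [ih _ hwlen hwrow (fun a ha => hlt a (List.mem_cons_of_mem _ ha)) j i']
      by_cases hj : j < m.length
      · rw [if_pos ⟨Nat.zero_le _, hj⟩] at hw
        have hrl : i < (out.getD j []).length := by
          rw [hrow j]
          have hmem' : m.getD j [] ∈ m := by
            rw [getD_lt _ _ _ hj]; exact List.getElem_mem hj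
          exact lt_of_lt_of_le hilt (hP _ hmem')
        by_cases hmem : i' ∈ is
        · rw [if_pos ⟨hmem, hj⟩, if_pos ⟨List.mem_cons_of_mem _ hmem, hj⟩]
        · rw [if_neg (by simp [hmem]), hw, getD_set_eq]
          by_cases hii : i' = i
          · subst hii
            rw [if_pos ⟨rfl, hrl⟩, if_pos ⟨List.mem_cons_self, hj⟩]
          · rw [if_neg (by simp [Ne.symm hii]),
                if_neg (by simp [hii, hmem])]
      · rw [if_neg (by omega)] at hw
        rw [if_neg (by simp [hj]), hw, if_neg (by simp [hj])]

lemma A_foldl_eq (m : List (List String)) (is : List Nat) : ∀ out,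
    is.foldl (fun out i =>
      ((m.map (fun line => line.getD i "")).zipIdx.foldl (stepA i)
        (out, PySem.Dict.empty, 0)).1) out = applyCols m is out := by
  induction is with
  | nil => intro out; rfl
  | cons i is ih =>
      intro out
      simp only [List.foldl_cons, applyCols] at ih ⊢
      rw [A_inner]
      exact ih _

lemma out0_getD (m : List (List String)) (j : Nat) :
    (m.map (fun row => row.map (fun _ => (0 : Int)))).getD j [] =
      (m.getD j []).map (fun _ => (0 : Int)) := by
  rcases Nat.lt_or_ge j m.length with h | h
  · rw [getD_lt _ _ _ (by simpa using h), getD_lt _ _ _ h]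
    simp
  · rw [List.getD_eq_getElem?_getD, List.getD_eq_getElem?_getD,
        List.getElem?_eq_none (by simpa using h), List.getElem?_eq_none h]
    rfl

lemma A_eq_bOut (m : List (List String)) (hP : ∀ row ∈ m, (m.headD []).length ≤ row.length) :
    get_numeric_matrix m = bOut (m.headD []).length m := by
  unfold get_numeric_matrix
  rw [A_foldl_eq]
  apply List.ext_getElem
  · rw [applyCols_length]
    simp [bOut]
  · intro j h1 h2
    have hj : j < m.length := by rw [applyCols_length] at h1; simpa using h1
    have hAget : (applyCols m (List.range (m.headD []).length)
        (m.map (fun row => row.map (fun _ => (0 : Int)))))[j] =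
        (applyCols m (List.range (m.headD []).length)
          (m.map (fun row => row.map (fun _ => (0 : Int))))).getD j [] := by
      rw [getD_lt _ _ _ h1]
    rw [hAget]
    have hrowlen : ((applyCols m (List.range (m.headD []).length)
        (m.map (fun row => row.map (fun _ => (0 : Int))))).getD j []).length
        = (m.getD j []).length := by
      rw [applyCols_rowlen _ _ _ _ (by simp), out0_getD]
      simp
    apply List.ext_getElem
    · rw [hrowlen]
      simp [bOut, List.getElem_map, getD_lt _ _ _ hj]
    · intro i hi1 hi2
      have hi : i < (m.getD j []).length := by rw [hrowlen] at hi1; exact hi1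
      have hget : ((applyCols m (List.range (m.headD []).length)
          (m.map (fun row => row.map (fun _ => (0 : Int))))).getD j [])[i] =
          ((applyCols m (List.range (m.headD []).length)
            (m.map (fun row => row.map (fun _ => (0 : Int))))).getD j []).getD i 0 := by
        rw [getD_lt _ _ _ hi1]
      rw [hget]
      rw [applyCols_getD m hP _ _ (by simp) (fun j' => by rw [out0_getD]; simp)
          (fun a ha => List.mem_range.mp ha) j i]
      have hB : (bOut (m.headD []).length m)[j][i] =
          (if i < (m.headD []).length
            then (runCol (PySem.Dict.empty, 0) (colOf m i)).getD j 0 else 0) := by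
        simp [bOut, getD_lt _ _ _ hj, hi]
      rw [hB, out0_getD, getD_map_zero]
      by_cases hic : i < (m.headD []).length
      · rw [if_pos ⟨List.mem_range.mpr hic, hj⟩, if_pos hic]
      · rw [if_neg (fun h => hic (List.mem_range.mp h.1)), if_neg hic]

-- ========== B side ==========

def mapStep (row : List String) : Nat → List (PySem.Dict String Int × Int) →
    List (PySem.Dict String Int × Int)
  | _, [] => []
  | k, st :: sts => st1 st (row.getD k "") :: mapStep row (k + 1) sts

def fillRow (row : List String) : Nat → List (PySem.Dict String Int × Int) → List Int → List Int
  | _, [], orow => orow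
  | k, st :: sts, orow => fillRow row (k + 1) sts (orow.set k (lab1 st (row.getD k "")))

lemma stepB_eq (row : List String) (acc : List (PySem.Dict String Int × Int)) (orow : List Int)
    (st : PySem.Dict String Int × Int) (k : Nat) :
    stepB row (acc, orow) (st, k) =
      (acc ++ [st1 st (row.getD k "")], orow.set k (lab1 st (row.getD k ""))) := by
  simp only [stepB, pyLabel, lab1, st1]
  generalize row.getD k "" = c
  cases h : st.1.get? c <;> simp [h]

lemma B_inner (row : List String) (sts : List (PySem.Dict String Int × Int)) :
    ∀ (k : Nat) acc orow,
    (sts.zipIdx k).foldl (stepB row) (acc, orow) =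
      (acc ++ mapStep row k sts, fillRow row k sts orow) := by
  induction sts with
  | nil => intro k acc orow; simp [mapStep, fillRow]
  | cons st sts ih =>
      intro k acc orow
      rw [List.zipIdx_cons, List.foldl_cons, stepB_eq, ih]
      simp [mapStep, fillRow]

lemma length_mapStep (row : List String) (sts : List (PySem.Dict String Int × Int)) :
    ∀ k, (mapStep row k sts).length = sts.length := by
  induction sts with
  | nil => intro k; rfl
  | cons st sts ih => intro k; simp [mapStep, ih]

lemma getElem_mapStep (row : List String) (sts : List (PySem.Dict String Int × Int)) :
    ∀ k t (h : t < sts.length),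
    (mapStep row k sts)[t]'(by rw [length_mapStep]; exact h) =
      st1 (sts[t]) (row.getD (k + t) "") := by
  induction sts with
  | nil => intro k t h; exact absurd h (by simp)
  | cons st sts ih =>
      intro k t h
      cases t with
      | zero => simp [mapStep]
      | succ t =>
          have harith : k + (t + 1) = (k + 1) + t := by omega
          simp only [mapStep, List.getElem_cons_succ, harith]
          exact ih (k + 1) t (by simpa using h)

lemma length_fillRow (row : List String) (sts : List (PySem.Dict String Int × Int)) :
    ∀ k orow, (fillRow row k sts orow).length = orow.length := by
  induction sts with
  | nil => intro k orow; rfl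
  | cons st sts ih => intro k orow; simp [fillRow, ih]

lemma getD_fillRow (row : List String) (sts : List (PySem.Dict String Int × Int)) :
    ∀ k (orow : List Int) (i : Nat), k + sts.length ≤ orow.length →
    (fillRow row k sts orow).getD i 0 =
      if k ≤ i ∧ i < k + sts.length
      then lab1 (sts.getD (i - k) (PySem.Dict.empty, 0)) (row.getD i "")
      else orow.getD i 0 := by
  induction sts with
  | nil => intro k orow i _; simp [fillRow]
  | cons st sts ih =>
      intro k orow i h
      have hk : k < orow.length := by simp at h; omega
      rw [fillRow, ih (k + 1) _ i (by simp at h ⊢; omega)]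
      by_cases hi : i = k
      · subst hi
        have : ¬ (i + 1 ≤ i ∧ i < i + 1 + sts.length) := by omega
        simp only [this, if_neg]
        rw [getD_set_eq]
        simp [hk]
      · by_cases hr : k + 1 ≤ i ∧ i < k + 1 + sts.length
        · have hr' : k ≤ i ∧ i < k + (sts.length + 1) := by omega
          simp only [hr, if_pos, List.length_cons, hr', and_true]
          have : i - k = (i - (k + 1)) + 1 := by omega
          simp [this]
        · have hr' : ¬ (k ≤ i ∧ i < k + (sts.length + 1)) := by omega
          simp only [hr, if_neg, List.length_cons, hr']
          rw [getD_set_eq]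
          have : ¬ (k = i ∧ k < orow.length) := by simp [hi]; omega
          simp [this]

lemma bStates_getD (nc : Nat) (p : List (List String)) (i : Nat) (h : i < nc) :
    (bStates nc p).getD i (PySem.Dict.empty, 0) = runSt (PySem.Dict.empty, 0) (colOf p i) := by
  rw [getD_lt _ _ _ (by simp [bStates, h])]
  simp [bStates]

lemma mapStep_bStates (nc : Nat) (p : List (List String)) (row : List String) :
    mapStep row 0 (bStates nc p) = bStates nc (p ++ [row]) := by
  apply List.ext_getElem
  · simp [length_mapStep, bStates]
  · intro t h1 h2
    have ht : t < nc := by simp [length_mapStep, bStates] at h1; exact h1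
    rw [getElem_mapStep row _ 0 t (by simp [bStates]; exact ht)]
    have h3 : (bStates nc p)[t]'(by simp [bStates]; exact ht) =
        runSt (PySem.Dict.empty, 0) (colOf p t) := by simp [bStates]
    rw [h3]
    have h4 : (bStates nc (p ++ [row]))[t]'h2 =
        runSt (PySem.Dict.empty, 0) (colOf (p ++ [row]) t) := by simp [bStates]
    rw [h4, colOf_append, runSt_append]
    simp [colOf, runSt]

lemma bOut_append (nc : Nat) (p : List (List String)) (row : List String)
    (hnc : nc ≤ row.length) :
    bOut nc (p ++ [row]) = bOut nc p ++ [fillRow row 0 (bStates nc p) (row.map (fun _ => (0 : Int)))] := by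
  unfold bOut
  have hlen : (p ++ [row]).length = p.length + 1 := by simp
  rw [hlen, List.range_succ, List.map_append]
  congr 1
  · apply List.map_congr_left
    intro j hj
    have hj' : j < p.length := List.mem_range.mp hj
    rw [getD_append_left _ _ _ _ hj']
    apply List.map_congr_left
    intro i hi
    by_cases hic : i < nc
    · simp only [hic, if_pos]
      rw [colOf_append, runCol_append, getD_append_left]
      rw [length_runCol]
      simp [colOf, hj']
    · simp [hic]
  · simp only [List.map_cons, List.map_nil]
    congr 1
    rw [getD_append_len]
    have hrow : ([row] : List (List String)).getD 0 [] = row := rfl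
    rw [hrow]
    apply List.ext_getElem
    · simp [length_fillRow]
    · intro i h1 h2
      have hi : i < row.length := by simpa using h1
      have h2' : i < (fillRow row 0 (bStates nc p) (row.map (fun _ => (0 : Int)))).length := by
        rw [length_fillRow]; simpa using hi
      rw [← getD_lt _ _ _ h2']
      rw [getD_fillRow _ _ _ _ _ (by simp [bStates]; omega)]
      by_cases hic : i < nc
      · have : 0 ≤ i ∧ i < 0 + (bStates nc p).length := by simp [bStates]; exact hic
        simp only [this, if_pos]
        rw [Nat.sub_zero, bStates_getD nc p i hic]
        simp only [hi, List.getElem_map, List.getElem_range, hic, if_pos]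
        rw [colOf_append, runCol_append]
        have hL : (runCol (PySem.Dict.empty, 0) (colOf p i)).length = p.length := by
          rw [length_runCol]; simp [colOf]
        rw [← hL, getD_append_len]
        simp [colOf, runCol, runSt]
      · have : ¬ (0 ≤ i ∧ i < 0 + (bStates nc p).length) := by simp [bStates]; omega
        simp only [this, if_neg]
        simp [hic, List.getD_eq_getElem?_getD, List.getElem?_map,
          List.getElem?_eq_getElem hi]

lemma B_fold (nc : Nat) (rest : List (List String)) :
    ∀ p, (∀ row ∈ rest, nc ≤ row.length) →
    rest.foldl
      (fun (acc : List (List Int) × List (PySem.Dict String Int × Int)) row =>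
        let zero := row.map (fun _ => (0 : Int))
        let r := acc.2.zipIdx.foldl (stepB row) ([], zero)
        (acc.1 ++ [r.2], r.1))
      (bOut nc p, bStates nc p) = (bOut nc (p ++ rest), bStates nc (p ++ rest)) := by
  induction rest with
  | nil => intro p _; simp
  | cons row rest ih =>
      intro p hnc
      rw [List.foldl_cons]
      have hstep : (let zero := row.map (fun _ => (0 : Int))
          let r := (bStates nc p).zipIdx.foldl (stepB row) ([], zero)
          ((bOut nc p) ++ [r.2], r.1)) = (bOut nc (p ++ [row]), bStates nc (p ++ [row])) := by
        simp only [B_inner row (bStates nc p) 0 [] _]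
        rw [mapStep_bStates]
        rw [bOut_append nc p row (hnc row List.mem_cons_self)]
        simp
      rw [hstep, ih (p ++ [row]) (fun r hr => hnc r (List.mem_cons_of_mem _ hr))]
      simp

lemma B_eq_bOut (m : List (List String)) (hP : ∀ row ∈ m, (m.headD []).length ≤ row.length) :
    get_numeric_matrix_alt m = bOut (m.headD []).length m := by
  have h0 : ((List.range (m.headD []).length).map
      (fun _ => ((PySem.Dict.empty : PySem.Dict String Int), (0 : Int)))) =
      bStates (m.headD []).length [] := by
    apply List.map_congr_left
    intro i _
    simp [bStates, colOf, runSt]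
  show (m.foldl
      (fun (acc : List (List Int) × List (PySem.Dict String Int × Int)) row =>
        let zero := row.map (fun _ => (0 : Int))
        let r := acc.2.zipIdx.foldl (stepB row) ([], zero)
        (acc.1 ++ [r.2], r.1))
      (([] : List (List Int)),
        (List.range (m.headD []).length).map
          (fun _ => ((PySem.Dict.empty : PySem.Dict String Int), (0 : Int))))).1
    = bOut (m.headD []).length m
  rw [h0]
  have hb : ((([] : List (List Int)), bStates (m.headD []).length [])) =
      (bOut (m.headD []).length [], bStates (m.headD []).length []) := by simp [bOut]
  rw [hb, B_fold (m.headD []).length m [] hP]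
  simp

-- ===== VERDICT (by name: the statement is the Claim_ definition above) =====
theorem get_numeric_matrix_spec : Claim_equal_get_numeric_matrix := by
  intro matrix _ hPre
  unfold Spec_get_numeric_matrix
  rw [A_eq_bOut matrix hPre.2, B_eq_bOut matrix hPre.2]
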